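-- pv_equiv track=rewrite | github.com/MantisSTS/JSReconduit | burp-extension/jsreconduit_burp.py | _extract_sourcemap_url
-- ===== SOURCE A (Python) =====
-- def _extract_sourcemap_url(body_text):
--     marker = "sourceMappingURL="
--     idx = body_text.rfind(marker)
--     if idx == -1:
--         return ""
--     tail = body_text[idx + len(marker):]
--     for sep in ["\n", "\r"]:
--         if sep in tail:
--             tail = tail.split(sep, 1)[0]
--     tail = tail.replace("*/", "").strip()
--     return tail
-- ===== SOURCE B (Python) =====
-- def _extract_sourcemap_url(body_text):
--     marker = "sourceMappingURL="
--     if marker not in body_text: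
--         return ""
--     tail = body_text
--     while marker in tail:
--         tail = tail.partition(marker)[2]
--     url = []
--     for ch in tail:
--         if ch in "\r\n":
--             break
--         url.append(ch)
--     return "".join(url).replace("*/", "").strip()
-- ===== Notes on version B (the rewrite author's own statement) =====
-- stated objective: alternative
-- what changed: Replaces the single rfind-from-the-right plus two successive split(sep,1) truncations by an iterated first-occurrence partition loop that lands after the last marker, and a single left-to-right character scan that stops at the first CR/LF.
import Mathlib
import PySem

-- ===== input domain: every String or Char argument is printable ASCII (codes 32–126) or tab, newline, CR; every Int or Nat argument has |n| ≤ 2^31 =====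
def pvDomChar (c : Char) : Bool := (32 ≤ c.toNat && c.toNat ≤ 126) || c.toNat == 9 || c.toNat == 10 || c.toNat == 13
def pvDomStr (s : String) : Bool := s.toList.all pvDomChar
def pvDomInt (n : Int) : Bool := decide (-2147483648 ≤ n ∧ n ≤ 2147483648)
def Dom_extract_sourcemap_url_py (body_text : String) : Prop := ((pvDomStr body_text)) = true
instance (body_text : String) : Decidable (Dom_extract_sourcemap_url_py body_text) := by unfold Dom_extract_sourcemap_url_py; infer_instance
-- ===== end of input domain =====

-- B replaces the rfind-from-the-right plus two successive split(sep,1) truncations by an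
-- iterated first-occurrence partition loop and a single character scan stopping at the first CR/LF;
-- objective: alternative (same O(n) cost, different decomposition).

-- ===== PORT A =====
def extract_sourcemap_url_py (body_text : String) : String :=
  let marker := "sourceMappingURL="
  let idx := PySem.Str.rfind body_text marker
  if idx = -1 then ""
  else
    let tail := PySem.Str.slice body_text (some (idx + PySem.Str.len marker)) none
    let tail := [("\n" : String), "\r"].foldl
      (fun tail sep =>
        if PySem.Str.isIn sep tail then ((PySem.Str.splitMax? tail sep 1).getD []).headD ""
        else tail) tail
    PySem.Str.strip (PySem.Str.replace tail "*/" "")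

-- ===== PORT B =====
-- the `for ch in tail: if ch in "\r\n": break; url.append(ch)` loop of Source B
def pvTakeUrl : List Char → List Char
  | [] => []
  | c :: t => if c = '\r' ∨ c = '\n' then [] else c :: pvTakeUrl t

-- the `while marker in tail: tail = tail.partition(marker)[2]` loop of Source B
def pvLastTail (cs : List Char) : List Char :=
  if h : PySem.Chars.isIn "sourceMappingURL=".toList cs = true then
    pvLastTail (cs.drop ((PySem.Chars.find cs "sourceMappingURL=".toList).toNat
      + "sourceMappingURL=".toList.length))
  else cs
termination_by cs.length
decreasing_by
  have hinf : "sourceMappingURL=".toList <:+: cs := (PySem.Chars.isIn_iff_infix _ _).mp h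
  have hlen : "sourceMappingURL=".toList.length ≤ cs.length := hinf.length_le
  have h17 : "sourceMappingURL=".toList.length = 17 := by decide
  simp only [List.length_drop]
  omega

def extract_sourcemap_url_py_alt (body_text : String) : String :=
  let marker := "sourceMappingURL="
  if PySem.Str.isIn marker body_text then
    PySem.Str.strip (PySem.Str.replace
      (String.ofList (pvTakeUrl (pvLastTail body_text.toList))) "*/" "")
  else ""

-- ===== PRECONDITION & SPEC =====
def Spec_extract_sourcemap_url_py (body_text : String) (out : String) : Prop := out = extract_sourcemap_url_py_alt body_text
instance (body_text : String) (out : String) : Decidable (Spec_extract_sourcemap_url_py body_text out) := by unfold Spec_extract_sourcemap_url_py; infer_instance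

-- ===== CLAIM (what is proved, stated in full; the proofs are below) =====
def Claim_equal_extract_sourcemap_url_py : Prop := ∀ (body_text : String), Dom_extract_sourcemap_url_py body_text → Spec_extract_sourcemap_url_py body_text (extract_sourcemap_url_py body_text)

-- ===== LEMMAS AND PROOFS =====


theorem pv_rfind_go_eq_neg_one_iff (s sub : List Char) (k : Nat) :
    PySem.Chars.rfind.go s sub k = -1 ↔ ∀ j ≤ k, ¬ sub <+: s.drop j := by
  induction k with
  | zero =>
    simp only [PySem.Chars.rfind.go]
    by_cases hp : sub.isPrefixOf s
    · rw [if_pos hp]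
      simp only [List.isPrefixOf_iff_prefix] at hp
      constructor
      · intro h; omega
      · intro h; exact absurd (by simpa using hp) (by simpa using h 0 (le_refl 0))
    · rw [if_neg hp]
      simp only [List.isPrefixOf_iff_prefix] at hp
      constructor
      · intro _ j hj
        interval_cases j
        simpa using hp
      · intro _; rfl
  | succ k ih =>
    simp only [PySem.Chars.rfind.go]
    by_cases hp : sub.isPrefixOf (s.drop (k+1))
    · rw [if_pos hp]
      simp only [List.isPrefixOf_iff_prefix] at hp
      constructor
      · intro h; omega
      · intro h; exact absurd hp (h (k+1) (le_refl _))
    · rw [if_neg hp]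
      simp only [List.isPrefixOf_iff_prefix] at hp
      rw [ih]
      constructor
      · intro h j hj
        rcases Nat.lt_or_ge j (k+1) with hl | hl
        · exact h j (by omega)
        · have : j = k + 1 := by omega
          subst this; exact hp
      · intro h j hj
        exact h j (by omega)

theorem pv_rfind_go_spec (s sub : List Char) (k : Nat)
    (h : PySem.Chars.rfind.go s sub k ≠ -1) :
    0 ≤ PySem.Chars.rfind.go s sub k ∧ (PySem.Chars.rfind.go s sub k).toNat ≤ k ∧
    sub <+: s.drop (PySem.Chars.rfind.go s sub k).toNat ∧
    ∀ j, (PySem.Chars.rfind.go s sub k).toNat < j → j ≤ k → ¬ sub <+: s.drop j := by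
  induction k with
  | zero =>
    simp only [PySem.Chars.rfind.go] at *
    by_cases hp : sub.isPrefixOf s
    · rw [if_pos hp]
      simp only [List.isPrefixOf_iff_prefix] at hp
      refine ⟨by omega, by simp, by simpa using hp, ?_⟩
      intro j hj hj2; omega
    · rw [if_neg hp] at h; simp at h
  | succ k ih =>
    simp only [PySem.Chars.rfind.go] at *
    by_cases hp : sub.isPrefixOf (s.drop (k+1))
    · rw [if_pos hp]
      simp only [List.isPrefixOf_iff_prefix] at hp
      refine ⟨by omega, by simp, by simpa using hp, ?_⟩
      intro j hj hj2
      have : ((k+1 : Nat) : Int).toNat = k+1 := by simp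
      omega
    · rw [if_neg hp] at h ⊢
      simp only [List.isPrefixOf_iff_prefix] at hp
      obtain ⟨h0, hle, hpre, hmax⟩ := ih h
      refine ⟨h0, by omega, hpre, ?_⟩
      intro j hj hj2
      rcases Nat.lt_or_ge j (k+1) with hl | hl
      · exact hmax j hj (by omega)
      · have : j = k + 1 := by omega
        subst this; exact hp
theorem pv_prefix_drop_le (s sub : List Char) (hsub : sub ≠ []) (j : Nat)
    (h : sub <+: s.drop j) : j < s.length := by
  by_contra hc
  rw [not_lt] at hc
  rw [List.drop_eq_nil_of_le hc] at h
  exact hsub (List.prefix_nil.mp h)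

theorem pv_rfind_eq_neg_one_iff (s sub : List Char) (hsub : sub ≠ []) :
    PySem.Chars.rfind s sub = -1 ↔ ¬ sub <:+: s := by
  rw [PySem.Chars.rfind, pv_rfind_go_eq_neg_one_iff]
  constructor
  · intro h hinf
    obtain ⟨j, hj⟩ := (PySem.Chars.exists_prefix_drop_iff_isIn sub s).symm.mp
      ((PySem.Chars.isIn_iff_infix sub s).mpr hinf)
    exact h j (le_of_lt (pv_prefix_drop_le s sub hsub j hj)) hj
  · intro h j _ hj
    exact h ((PySem.Chars.isIn_iff_infix sub s).mp
      ((PySem.Chars.exists_prefix_drop_iff_isIn sub s).mp ⟨j, hj⟩))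

theorem pv_rfind_spec (s sub : List Char) (hsub : sub ≠ []) (h : sub <:+: s) :
    0 ≤ PySem.Chars.rfind s sub ∧
    sub <+: s.drop (PySem.Chars.rfind s sub).toNat ∧
    ∀ j, (PySem.Chars.rfind s sub).toNat < j → ¬ sub <+: s.drop j := by
  have hne : PySem.Chars.rfind s sub ≠ -1 := by
    rw [ne_eq, pv_rfind_eq_neg_one_iff s sub hsub]; simpa using h
  rw [PySem.Chars.rfind] at *
  obtain ⟨h0, hle, hpre, hmax⟩ := pv_rfind_go_spec s sub s.length hne
  refine ⟨h0, hpre, ?_⟩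
  intro j hj
  rcases Nat.lt_or_ge j (s.length + 1) with hl | hl
  · exact hmax j hj (by omega)
  · intro hp
    exact absurd (pv_prefix_drop_le s sub hsub j hp) (by omega)

theorem pv_no_overlap (cs : List Char) (i j : Nat)
    (hi : "sourceMappingURL=".toList <+: cs.drop i)
    (hj : "sourceMappingURL=".toList <+: cs.drop j)
    (hij : i < j) (hlt : j < i + 17) : False := by
  set M := "sourceMappingURL=".toList with hM
  have hMlen : M.length = 17 := by decide
  obtain ⟨rest, hrest⟩ := hi
  have hdj : cs.drop j = M.drop (j - i) ++ rest := by
    have : cs.drop j = (cs.drop i).drop (j - i) := by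
      rw [List.drop_drop]; congr 1; omega
    rw [this, ← hrest, List.drop_append_of_le_length (by omega)]
  rw [hdj] at hj
  have hpre : M.drop (j - i) <+: M.drop (j - i) ++ rest := List.prefix_append _ _
  have hsh : M.drop (j - i) <+: M :=
    List.prefix_of_prefix_length_le hpre hj (by simp [hMlen])
  have hk : j - i < 17 ∧ 0 < j - i := by omega
  have : ∀ k, k < 17 → 0 < k → ¬ (M.drop k <+: M) := by decide
  exact this (j - i) hk.1 hk.2 hsh

theorem pv_lastTail_eq (cs : List Char)
    (h : "sourceMappingURL=".toList <:+: cs) :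
    pvLastTail cs = cs.drop ((PySem.Chars.rfind cs "sourceMappingURL=".toList).toNat + 17) := by
  induction cs using pvLastTail.induct with
  | case1 cs hin ih =>
    set M := "sourceMappingURL=".toList with hM
    have hMne : M ≠ [] := by decide
    have hMlen : M.length = 17 := by rw [hM]; decide
    rw [hMlen] at ih
    have hfnn : 0 ≤ PySem.Chars.find cs M := by
      rw [PySem.Chars.find_nonneg_iff]
      exact (PySem.Chars.isIn_iff_infix _ _).mp hin
    obtain ⟨hfp, hfmin⟩ := PySem.Chars.find_spec hfnn
    set i := (PySem.Chars.find cs M).toNat with hi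
    obtain ⟨hr0, hrp, hrmax⟩ := pv_rfind_spec cs M hMne h
    set r := (PySem.Chars.rfind cs M).toNat with hr
    have hir : i ≤ r := by
      by_contra hc
      exact hfmin r (by omega) hrp
    rw [pvLastTail, dif_pos hin, ← hi, hMlen]
    by_cases h2 : M <:+: cs.drop (i + 17)
    · have ih2 := ih h2
      obtain ⟨hr0', hrp', hrmax'⟩ := pv_rfind_spec (cs.drop (i + 17)) M hMne h2
      set r' := (PySem.Chars.rfind (cs.drop (i + 17)) M).toNat with hr'
      rw [List.drop_drop] at hrp'
      have hreq : r = i + 17 + r' := by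
        rcases Nat.lt_trichotomy r (i + 17 + r') with hl | he | hg
        · exact absurd hrp' (hrmax _ hl)
        · exact he
        · exfalso
          have : M <+: List.drop (r - (i + 17)) (List.drop (i + 17) cs) := by
            rw [List.drop_drop]
            have : i + 17 + (r - (i + 17)) = r := by omega
            rw [this]; exact hrp
          exact hrmax' (r - (i + 17)) (by omega) this
      rw [ih2, List.drop_drop]
      congr 1
      omega
    · have hri : r = i := by
        rcases Nat.lt_or_ge i r with hl | hl
        · exfalso
          rcases Nat.lt_or_ge r (i + 17) with ho | ho
          · exact pv_no_overlap cs i r hfp hrp hl ho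
          · refine h2 ?_
            have hp2 : M <+: List.drop (r - (i + 17)) (List.drop (i + 17) cs) := by
              rw [List.drop_drop]
              have : i + 17 + (r - (i + 17)) = r := by omega
              rw [this]; exact hrp
            exact hp2.isInfix.trans (List.drop_suffix _ _).isInfix
        · omega
      rw [pvLastTail]
      rw [dif_neg (by simpa [PySem.Chars.isIn_eq_false_iff] using h2)]
      rw [hri]
  | case2 cs hin =>
    exact absurd ((PySem.Chars.isIn_iff_infix _ _).mpr h) (by simpa using hin)



theorem pv_go_zero (sep : List Char) (f : Nat) (l cur : List Char) (acc : List (List Char)) :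
    PySem.Chars.splitOnMax.go sep f 0 l cur acc = ((cur.reverse ++ l) :: acc).reverse := by
  match f, l with
  | 0, l => rw [PySem.Chars.splitOnMax.go]
  | f+1, [] => rw [PySem.Chars.splitOnMax.go] <;> simp
  | f+1, c :: t => rw [PySem.Chars.splitOnMax.go] <;> simp

theorem pv_go_one (c : Char) (l : List Char) (fuel : Nat) (cur : List Char)
    (hf : l.length < fuel) :
    ∃ r, PySem.Chars.splitOnMax.go [c] fuel 1 l cur [] =
      (cur.reverse ++ l.takeWhile (fun x => x != c)) :: r := by
  induction l generalizing fuel cur with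
  | nil =>
    match fuel, hf with
    | f+1, _ =>
      rw [PySem.Chars.splitOnMax.go]
      · exact ⟨[], by simp⟩
      · omega
  | cons x t ih =>
    match fuel, hf with
    | f+1, hf =>
      rw [PySem.Chars.splitOnMax.go]
      by_cases hx : x = c
      · subst hx
        simp only [List.isPrefixOf, List.isPrefixOf_nil_left, Bool.and_true, beq_self_eq_true,
          if_true, if_neg (by omega : ¬ (1:Nat) = 0)]
        rw [pv_go_zero]
        refine ⟨[List.drop 1 (x :: t)], by simp⟩
      · have hpre : ¬ ([c].isPrefixOf (x :: t)) := by
          simp [List.isPrefixOf]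
          exact fun hc => absurd hc.symm hx
        simp only [if_neg hpre, if_neg (by omega : ¬ (1:Nat) = 0)]
        obtain ⟨r, hr⟩ := ih f (x :: cur) (by simpa using Nat.lt_of_succ_lt_succ hf)
        refine ⟨r, ?_⟩
        rw [hr]
        simp [List.takeWhile_cons, hx]
theorem pv_step_eq (t sep : String) (c : Char) (hc : sep.toList = [c]) :
    (if PySem.Str.isIn sep t then ((PySem.Str.splitMax? t sep 1).getD []).headD "" else t).toList
      = t.toList.takeWhile (fun x => x != c) := by
  by_cases hin : PySem.Str.isIn sep t
  · rw [if_pos hin]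
    have hmap := PySem.Str.splitMax?_map t sep 1
    have hch : PySem.Chars.splitMax? t.toList sep.toList 1
        = some (PySem.Chars.splitOnMax t.toList sep.toList 1) := by
      rw [PySem.Chars.splitMax?, if_neg (by simp [hc])]
    obtain ⟨r, hr⟩ := pv_go_one c t.toList (t.toList.length + 1) [] (by omega)
    have hsplit : PySem.Chars.splitOnMax t.toList [c] 1
        = (t.toList.takeWhile (fun x => x != c)) :: r := by
      rw [PySem.Chars.splitOnMax, if_neg (by omega)]
      simpa using hr
    rw [hch, hc, hsplit] at hmap
    match hps : PySem.Str.splitMax? t sep 1 with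
    | none => rw [hps] at hmap; simp at hmap
    | some [] => rw [hps] at hmap; simp at hmap
    | some (p :: ps) =>
      rw [hps] at hmap
      simp only [Option.map_some, Option.some.injEq, List.map_cons, List.cons.injEq] at hmap
      simp [hmap.1]
  · rw [if_neg hin]
    have h0 : PySem.Chars.isIn sep.toList t.toList = false := by
      rw [← PySem.Str.isIn_eq]; simpa using hin
    rw [hc] at h0
    have hne : ¬ [c] <:+: t.toList := (PySem.Chars.isIn_eq_false_iff _ _).mp h0
    have hnm : c ∉ t.toList := fun hm => hne ((List.singleton_infix_iff c t.toList).mpr hm)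
    symm
    exact List.takeWhile_eq_self_iff.mpr (fun x hx => by
      simp only [bne_iff_ne, ne_eq]
      exact fun he => hnm (he ▸ hx))

theorem pv_takeUrl_eq (l : List Char) :
    pvTakeUrl l = (l.takeWhile (fun x => x != '\n')).takeWhile (fun x => x != '\r') := by
  rw [List.takeWhile_takeWhile]
  induction l with
  | nil => rfl
  | cons x t ih =>
    rw [pvTakeUrl, List.takeWhile_cons]
    by_cases hx : x = '\r' ∨ x = '\n'
    · rw [if_pos hx]
      rcases hx with h | h <;> subst h <;> simp
    · rw [if_neg hx]
      rw [not_or] at hx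
      simp only [bne_iff_ne, ne_eq, hx.1, hx.2, not_false_eq_true, and_self, decide_true, if_true]
      rw [ih]
      simp

-- A's truncation loop over ["\n", "\r"], as one takeWhile chain
theorem pv_fold_eq (t0 : String) :
    ([("\n" : String), "\r"].foldl
      (fun tail sep => if PySem.Str.isIn sep tail then ((PySem.Str.splitMax? tail sep 1).getD []).headD "" else tail) t0).toList
    = (t0.toList.takeWhile (fun x => x != '\n')).takeWhile (fun x => x != '\r') := by
  simp only [List.foldl_cons, List.foldl_nil]
  rw [pv_step_eq _ "\r" '\r' (by decide), pv_step_eq t0 "\n" '\n' (by decide)]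

-- ===== VERDICT (by name: the statement is the Claim_ definition above) =====
theorem extract_sourcemap_url_py_spec : Claim_equal_extract_sourcemap_url_py := by
  intro body_text _hdom
  unfold Spec_extract_sourcemap_url_py
  unfold extract_sourcemap_url_py extract_sourcemap_url_py_alt
  dsimp only
  set M := "sourceMappingURL=".toList with hM
  have hMne : M ≠ [] := by decide
  by_cases hin : PySem.Str.isIn "sourceMappingURL=" body_text
  · -- marker occurs
    rw [if_pos hin]
    have hinf : M <:+: body_text.toList := by
      rw [hM, ← PySem.Chars.isIn_iff_infix, ← PySem.Str.isIn_eq]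
      exact hin
    have hr0 : 0 ≤ PySem.Str.rfind body_text "sourceMappingURL=" := by
      rw [PySem.Str.rfind_eq, ← hM]
      rcases (pv_rfind_spec body_text.toList M hMne hinf) with ⟨h0, _, _⟩
      exact h0
    rw [if_neg (by omega)]
    have hlen17 : PySem.Str.len "sourceMappingURL=" = 17 := by decide
    rw [hlen17]
    set idx := PySem.Str.rfind body_text "sourceMappingURL=" with hidx
    refine congrArg (fun s => PySem.Str.strip (PySem.Str.replace s "*/" "")) ?_
    have htail0 : (PySem.Str.slice body_text (some (idx + 17)) none).toList
        = body_text.toList.drop (idx.toNat + 17) := by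
      simp only [PySem.Str.slice, String.toList_ofList, PySem.Chars.slice_eq_listSlice]
      rw [PySem.List.slice_from (xs := body_text.toList) (a := idx + 17) (by omega)]
      congr 1
      omega
    have hfold := pv_fold_eq (PySem.Str.slice body_text (some (idx + 17)) none)
    have hAB : ((PySem.Str.slice body_text (some (idx + 17)) none).toList.takeWhile
          (fun x => x != '\n')).takeWhile (fun x => x != '\r')
        = pvTakeUrl (pvLastTail body_text.toList) := by
      rw [pv_lastTail_eq _ (hM ▸ hinf), pv_takeUrl_eq, htail0]
      rw [hidx, PySem.Str.rfind_eq]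
    rw [hAB] at hfold
    rw [← hfold, String.ofList_toList]
  · -- no marker
    rw [if_neg hin]
    have hni : ¬ M <:+: body_text.toList := by
      rw [hM, ← PySem.Chars.isIn_iff_infix, ← PySem.Str.isIn_eq]
      simpa using hin
    have hm1 : PySem.Str.rfind body_text "sourceMappingURL=" = -1 := by
      rw [PySem.Str.rfind_eq]
      exact (pv_rfind_eq_neg_one_iff body_text.toList M hMne).mpr hni
    rw [hm1, if_pos rfl]
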